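-- pv_equiv track=rewrite | github.com/Rajedyoda/edyoda_DSA_Assignment_1 | Q7_covert_prefix_to_infix.py | prefixToInfix
-- ===== SOURCE A (Python) =====
-- def prefixToInfix(prefix):
--     stack = []
--
--     i = len(prefix) - 1
--     while i >= 0:
--         if not isOperator(prefix[i]):
--
--             stack.append(prefix[i])
--             i -= 1
--         else:
--
--             str = "(" + stack.pop() + prefix[i] + stack.pop() + ")"
--             stack.append(str)
--             i -= 1
--
--     return stack.pop()
--
-- def isOperator(conver):
--     if conver == "*" or conver == "+" or conver == "-" or conver == "/" or conver == "^" or conver == "(" or conver == ")":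
--         return True
--     else:
--         return False
-- ===== SOURCE B (Python) =====
-- def isOperator(conver):
--     if conver == "*" or conver == "+" or conver == "-" or conver == "/" or conver == "^" or conver == "(" or conver == ")":
--         return True
--     else:
--         return False
--
-- def prefixToInfix(prefix):
--     # Recursive-descent parse, scanning left-to-right with a shared index.
--     pos = [0]
--
--     def parse():
--         token = prefix[pos[0]]
--         pos[0] += 1
--         if isOperator(token):
--             left = parse()
--             right = parse()
--             return "(" + left + token + right + ")"
--         else:
--             return token
--
--     return parse()
-- ===== Notes on version B (the rewrite author's own statement) =====
-- stated objective: alternative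
-- what changed: Replaces the right-to-left stack evaluation with a left-to-right recursive-descent parser that reads each needed token once and builds the infix string by structural recursion.
import Mathlib
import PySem

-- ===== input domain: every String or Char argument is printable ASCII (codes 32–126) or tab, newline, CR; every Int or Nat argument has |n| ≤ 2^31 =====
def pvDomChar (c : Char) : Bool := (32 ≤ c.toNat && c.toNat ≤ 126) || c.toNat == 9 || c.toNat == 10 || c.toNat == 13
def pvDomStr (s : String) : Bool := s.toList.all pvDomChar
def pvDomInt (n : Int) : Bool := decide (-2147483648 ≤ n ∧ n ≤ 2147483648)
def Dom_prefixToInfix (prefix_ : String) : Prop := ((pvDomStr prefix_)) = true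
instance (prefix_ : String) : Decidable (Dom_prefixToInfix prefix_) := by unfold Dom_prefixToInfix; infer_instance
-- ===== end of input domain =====

-- B replaces A's right-to-left stack evaluation by a left-to-right recursive-descent
-- parser (alternative decomposition, same cost); return values agree wherever A returns.

-- ===== PORT A =====
-- isOperator, verbatim (note: '(' and ')' count as operators, as in the source)
def isOperatorP (conver : Char) : Bool :=
  if conver = '*' || conver = '+' || conver = '-' || conver = '/' || conver = '^'
     || conver = '(' || conver = ')' then true else false

-- one iteration of A's while-loop body at character c (stack top = list head;
-- 'none' models the IndexError of stack.pop() on an empty stack)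
def stepA (stack : List String) (c : Char) : Option (List String) :=
  if !(isOperatorP c) then
    some (String.singleton c :: stack)
  else
    match stack with
    | a :: b :: rest => some (("(" ++ a ++ String.singleton c ++ b ++ ")") :: rest)
    | _ => none

-- A scans i = len-1 … 0, i.e. folds the character list in reverse order
def prefixToInfix (prefix_ : String) : String :=
  match prefix_.toList.reverse.foldl (fun os c => os.bind (fun s => stepA s c)) (some []) with
  | some (x :: _) => x      -- final stack.pop()
  | _ => ""                 -- Python raises IndexError here (outside Pre_)

-- ===== PORT B =====
-- recursive-descent parse: returns the infix string and the unread remainder;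
-- fuel (= input length) only guards totality, it never changes the computed value
def parseB : Nat → List Char → Option (String × List Char)
  | 0, _ => none
  | _ + 1, [] => none       -- prefix[pos] out of range: IndexError (outside Pre_)
  | f + 1, c :: rest =>
    if isOperatorP c then
      match parseB f rest with
      | some (l, r1) =>
        match parseB f r1 with
        | some (r, r2) => some ("(" ++ l ++ String.singleton c ++ r ++ ")", r2)
        | none => none
      | none => none
    else
      some (String.singleton c, rest)

def prefixToInfix_alt (prefix_ : String) : String :=
  match parseB prefix_.toList.length prefix_.toList with
  | some (s, _) => s
  | none => ""              -- Python raises IndexError here (outside Pre_)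

-- ===== PRECONDITION & SPEC =====
-- token weight: operand +1, operator -1
def wtP (c : Char) : Int := if isOperatorP c then -1 else 1
def sumW (xs : List Char) : Int := (xs.map wtP).sum

-- suffix check: a suffix starting with an operator must leave remaining weight >= 2
def sufCondB (ys : List Char) : Bool :=
  match ys with
  | [] => true
  | c :: t => !(isOperatorP c) || decide (2 ≤ sumW t)

-- Pre_ holds exactly where Python A returns normally (no IndexError): the total
-- weight is >= 1 and every suffix passes sufCondB (so each stack.pop() pair and
-- the final pop succeed).
def Pre_prefixToInfix (prefix_ : String) : Prop :=
  1 ≤ sumW prefix_.toList ∧ ∀ ys ∈ prefix_.toList.tails, sufCondB ys = true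

instance (prefix_ : String) : Decidable (Pre_prefixToInfix prefix_) := by
  unfold Pre_prefixToInfix; infer_instance

def pvWitness_prefixToInfix : String := "*+ab-cd"

def Spec_prefixToInfix (prefix_ : String) (out : String) : Prop := out = prefixToInfix_alt prefix_
instance (prefix_ : String) (out : String) : Decidable (Spec_prefixToInfix prefix_ out) := by unfold Spec_prefixToInfix; infer_instance

-- ===== CLAIM (what is proved, stated in full; the proofs are below) =====
def Claim_equal_prefixToInfix : Prop := ∀ (prefix_ : String), Dom_prefixToInfix prefix_ → Pre_prefixToInfix prefix_ → Spec_prefixToInfix prefix_ (prefixToInfix prefix_)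

-- ===== LEMMAS AND PROOFS =====

-- A's whole scan as a foldr over the character list (foldl over the reverse)
def runA (xs : List Char) : Option (List String) :=
  xs.foldr (fun c os => os.bind (fun s => stepA s c)) (some [])

theorem runA_eq (xs : List Char) :
    xs.reverse.foldl (fun os c => os.bind (fun s => stepA s c)) (some []) = runA xs := by
  simp [runA, List.foldl_reverse]

theorem sumW_cons (c : Char) (xs : List Char) : sumW (c :: xs) = wtP c + sumW xs := by
  simp [sumW]

-- a successful parse strictly consumes input
theorem parseB_len_lt : ∀ (f : Nat) (xs : List Char) (s : String) (r : List Char),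
    parseB f xs = some (s, r) → r.length < xs.length := by
  intro f
  induction f with
  | zero => intro xs s r h; simp [parseB] at h
  | succ f ih =>
    intro xs s r h
    cases xs with
    | nil => simp [parseB] at h
    | cons c rest =>
      simp only [parseB] at h
      by_cases hc : isOperatorP c = true
      · simp [hc] at h
        cases h1 : parseB f rest with
        | none => simp [h1] at h
        | some p1 =>
          obtain ⟨l, r1⟩ := p1
          cases h2 : parseB f r1 with
          | none => simp [h1, h2] at h
          | some p2 =>
            obtain ⟨rr, r2⟩ := p2
            simp [h1, h2] at h
            have hA := ih rest l r1 h1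
            have hB := ih r1 rr r2 h2
            simp [← h.2]
            omega
      · simp [hc] at h
        simp [← h.2]

-- fuel irrelevance: any fuel ≥ the list length gives the same parse
theorem parseB_fuel : ∀ (f g : Nat) (xs : List Char), xs.length ≤ f → xs.length ≤ g →
    parseB f xs = parseB g xs := by
  intro f
  induction f with
  | zero =>
    intro g xs hf hg
    have : xs = [] := by cases xs <;> simp_all
    subst this
    cases g <;> simp [parseB]
  | succ f ih =>
    intro g xs hf hg
    cases xs with
    | nil => cases g <;> simp [parseB]
    | cons c rest =>
      cases g with
      | zero => simp at hg
      | succ g =>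
        simp only [parseB]
        by_cases hc : isOperatorP c = true
        · simp only [hc, if_pos]
          have hrest : parseB f rest = parseB g rest :=
            ih g rest (by simp at hf; omega) (by simp at hg; omega)
          rw [← hrest]
          cases h1 : parseB f rest with
          | none => rfl
          | some p1 =>
            obtain ⟨l, r1⟩ := p1
            have hr1 := parseB_len_lt f rest l r1 h1
            have h2 : parseB f r1 = parseB g r1 :=
              ih g r1 (by simp at hf; omega) (by simp at hg; omega)
            simp [h2]
        · simp [hc]

-- the suffix condition as an invariant over sublists
def SufOK (xs : List Char) : Prop := ∀ ys ∈ xs.tails, sufCondB ys = true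

theorem sufOK_tail {c : Char} {rest : List Char} (h : SufOK (c :: rest)) : SufOK rest := by
  intro ys hy
  exact h ys (by simp at *; tauto)

theorem sufOK_head {c : Char} {rest : List Char} (h : SufOK (c :: rest))
    (hc : isOperatorP c = true) : 2 ≤ sumW rest := by
  have := h (c :: rest) (by simp)
  simp [sufCondB, hc] at this
  exact this

-- A succeeds on any list satisfying the suffix condition, with stack size = total weight
theorem runA_ok : ∀ (xs : List Char), SufOK xs →
    ∃ st : List String, runA xs = some st ∧ (st.length : Int) = sumW xs := by
  intro xs
  induction xs with
  | nil => intro _; exact ⟨[], rfl, by simp [sumW]⟩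
  | cons c rest ih =>
    intro h
    obtain ⟨st, hst, hlen⟩ := ih (sufOK_tail h)
    by_cases hc : isOperatorP c = true
    · have h2 : 2 ≤ sumW rest := sufOK_head h hc
      match st, hlen with
      | a :: b :: r, hlen =>
        refine ⟨("(" ++ a ++ String.singleton c ++ b ++ ")") :: r, ?_, ?_⟩
        · simp only [runA, List.foldr] at hst ⊢
          rw [hst]
          simp [stepA, hc]
        · rw [sumW_cons]
          simp only [wtP, hc, if_pos, List.length_cons] at hlen ⊢
          push_cast at hlen ⊢
          linarith
      | [], hlen => simp at hlen; linarith
      | [a], hlen => simp at hlen; linarith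
    · refine ⟨String.singleton c :: st, ?_, ?_⟩
      · simp only [runA, List.foldr] at hst ⊢
        rw [hst]
        simp [stepA, hc]
      · rw [sumW_cons]
        simp only [wtP, hc, if_false, Bool.false_eq_true, List.length_cons]
        push_cast
        linarith
    
-- main correspondence: whenever A's scan of xs yields a stack, its top is what the
-- recursive-descent parse of xs returns, and the rest of the stack is A's scan of
-- the unread remainder
theorem runA_parseB : ∀ (n : Nat) (xs : List Char), xs.length ≤ n →
    ∀ st, runA xs = some st →
    (st = [] ∧ xs = []) ∨
    (∃ s st' r, st = s :: st' ∧ parseB xs.length xs = some (s, r) ∧ runA r = some st') := by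
  intro n
  induction n with
  | zero =>
    intro xs hx st hst
    have : xs = [] := by cases xs <;> simp_all
    subst this
    simp [runA] at hst
    exact Or.inl ⟨hst, rfl⟩
  | succ n ih =>
    intro xs hx st hst
    cases xs with
    | nil =>
      simp [runA] at hst
      exact Or.inl ⟨hst, rfl⟩
    | cons c rest =>
      right
      simp only [runA, List.foldr] at hst
      cases h0 : rest.foldr (fun c os => os.bind (fun s => stepA s c)) (some []) with
      | none => rw [h0] at hst; simp at hst
      | some st0 =>
        rw [h0] at hst
        simp at hst
        have hrest : runA rest = some st0 := h0
        by_cases hc : isOperatorP c = true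
        · -- operator: A pops two results; B parses two subexpressions
          match st0, hst with
          | a :: b :: r0, hst =>
            simp [stepA, hc] at hst
            obtain ⟨s1, st1, r1, heq1, hp1, hr1'⟩ :=
              (ih rest (by simp at hx; omega) _ hrest).resolve_left
                (by rintro ⟨h, _⟩; simp at h)
            obtain ⟨rfl, rfl⟩ : a = s1 ∧ b :: r0 = st1 := by
              injection heq1 with h1 h2; exact ⟨h1, h2⟩
            
            have hr1len : r1.length < rest.length := parseB_len_lt rest.length rest _ r1 hp1
            obtain ⟨s2, st2, r2, heq2, hp2, hr2'⟩ :=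
              (ih r1 (by simp at hx; omega) _ hr1').resolve_left
                (by rintro ⟨h, _⟩; simp at h)
            obtain ⟨rfl, rfl⟩ : b = s2 ∧ r0 = st2 := by
              injection heq2 with h1 h2; exact ⟨h1, h2⟩
            refine ⟨("(" ++ a).push c ++ b ++ ")", r0, r2, hst.symm, ?_, hr2'⟩
            show parseB (rest.length + 1) (c :: rest) = _
            simp only [parseB, hc, if_pos]
            rw [hp1]
            have hp2' : parseB rest.length r1 = some (b, r2) := by
              rw [parseB_fuel rest.length r1.length r1 (by omega) (le_refl _)]
              exact hp2
            simp [hp2']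
          | [], hst => simp [stepA, hc] at hst
          | [a], hst => simp [stepA, hc] at hst
        · -- operand: A pushes the single char; B returns it at once
          simp [stepA, hc] at hst
          refine ⟨String.singleton c, st0, rest, hst.symm, ?_, hrest⟩
          show parseB (rest.length + 1) (c :: rest) = _
          simp [parseB, hc]

-- ===== VERDICT (by name: the statement is the Claim_ definition above) =====
theorem prefixToInfix_spec : Claim_equal_prefixToInfix := by
  intro p _ hpre
  obtain ⟨hsum, hsuf⟩ := hpre
  obtain ⟨st, hst, hlen⟩ := runA_ok p.toList hsuf
  have hne : st ≠ [] := by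
    intro h; subst h; simp at hlen; linarith
  rcases runA_parseB p.toList.length p.toList (le_refl _) st hst with
    ⟨h1, _⟩ | ⟨s, st', r, hstE, hp, _⟩
  · exact absurd h1 hne
  · show prefixToInfix p = prefixToInfix_alt p
    unfold prefixToInfix prefixToInfix_alt
    rw [runA_eq, hst, hstE, hp]
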